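-- pv_equiv track=rewrite | github.com/lloxis/IPT | TP_XIII/main.py | degre
-- ===== SOURCE A (Python) =====
-- def degre(P):
--     taille = len(P)
--     if taille == 0:
--         return -1
--
--     coef = 0
--     i = 0
--     while coef==0:
--         if taille-i-1 < 0:
--             return -1
--         coef = P[taille-i-1]
--         i += 1
--
--     return taille-i
-- ===== SOURCE B (Python) =====
-- def degre(P):
--     deg = -1
--     for i, v in enumerate(P):
--         if v != 0:
--             deg = i
--     return deg
-- ===== Notes on version B (the rewrite author's own statement) =====
-- stated objective: simpler
-- what changed: Replaced the backward while-loop with index arithmetic and early exit by a single forward enumerate pass that keeps the last nonzero index seen.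
import Mathlib
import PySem

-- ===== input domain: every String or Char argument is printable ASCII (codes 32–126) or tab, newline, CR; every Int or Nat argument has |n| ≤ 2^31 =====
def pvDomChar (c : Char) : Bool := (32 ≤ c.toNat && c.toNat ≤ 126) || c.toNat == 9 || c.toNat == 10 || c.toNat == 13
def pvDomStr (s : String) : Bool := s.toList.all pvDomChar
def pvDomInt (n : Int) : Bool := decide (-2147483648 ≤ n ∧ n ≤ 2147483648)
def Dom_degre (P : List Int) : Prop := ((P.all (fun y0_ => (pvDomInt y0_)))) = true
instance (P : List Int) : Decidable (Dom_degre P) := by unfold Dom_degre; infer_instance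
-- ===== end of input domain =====

-- B replaces A's backward early-exit while-loop by a single forward enumerate pass keeping the last nonzero index (simpler; same cost).
-- ===== PORT A =====
-- A: backward while-loop from the top coefficient, early exit at the first nonzero.
def degreLoop (P : List Int) (taille i : Int) : Int :=
  if taille - i - 1 < 0 then -1
  else
    match PySem.List.pyGet? P (taille - i - 1) with
    | none => -1  -- unreachable when taille = P.length (would be IndexError in Python)
    | some coef => if coef == 0 then degreLoop P taille (i + 1) else taille - (i + 1)
termination_by (taille - i).toNat
decreasing_by omega

def degre (P : List Int) : Int :=
  let taille : Int := P.length
  if taille == 0 then -1 else degreLoop P taille 0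

-- ===== PORT B =====
-- B: single forward pass keeping the last nonzero index seen.
def degre_alt (P : List Int) : Int :=
  (PySem.List.enumerate P 0).foldl (fun deg iv => if iv.2 != 0 then iv.1 else deg) (-1)

-- ===== PRECONDITION & SPEC =====
def Spec_degre (P : List Int) (out : Int) : Prop := out = degre_alt P
instance (P : List Int) (out : Int) : Decidable (Spec_degre P out) := by unfold Spec_degre; infer_instance

-- ===== CLAIM (what is proved, stated in full; the proofs are below) =====
def Claim_equal_degre : Prop := ∀ (P : List Int), Dom_degre P → Spec_degre P (degre P)

-- ===== LEMMAS AND PROOFS =====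

theorem enumerate_append_singleton (xs : List Int) (z : Int) (s : Int) :
    PySem.List.enumerate (xs ++ [z]) s
      = PySem.List.enumerate xs s ++ [(s + xs.length, z)] := by
  induction xs generalizing s with
  | nil => simp [PySem.List.enumerate_cons, PySem.List.enumerate_nil]
  | cons a t ih =>
      simp [PySem.List.enumerate_cons, ih]
      ring_nf

theorem degre_alt_append (P : List Int) (z : Int) :
    degre_alt (P ++ [z]) = if z != 0 then (P.length : Int) else degre_alt P := by
  unfold degre_alt
  rw [enumerate_append_singleton, List.foldl_append]
  simp

theorem degreLoop_shift (P : List Int) (z : Int) : ∀ (k : Nat) (i : Int), 0 ≤ i →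
    ((P.length : Int) - i).toNat = k →
    degreLoop (P ++ [z]) (P.length + 1) (i + 1) = degreLoop P P.length i := by
  intro k
  induction k with
  | zero =>
      intro i hi hk
      have h1 : (P.length : Int) + 1 - (i + 1) - 1 < 0 := by omega
      have h2 : (P.length : Int) - i - 1 < 0 := by omega
      rw [degreLoop, if_pos h1, degreLoop, if_pos h2]
  | succ n ih =>
      intro i hi hk
      have hneg : ¬ ((P.length : Int) - i - 1 < 0) := by omega
      have hneg' : ¬ ((P.length : Int) + 1 - (i + 1) - 1 < 0) := by omega
      have hidx : (P.length : Int) + 1 - (i + 1) - 1 = (P.length : Int) - i - 1 := by ring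
      have h0 : 0 ≤ (P.length : Int) - i - 1 := by omega
      have hlt : ((P.length : Int) - i - 1).toNat < P.length := by omega
      have hget : PySem.List.pyGet? (P ++ [z]) ((P.length : Int) - i - 1)
          = PySem.List.pyGet? P ((P.length : Int) - i - 1) := by
        rw [PySem.List.pyGet?_of_nonneg _ h0, PySem.List.pyGet?_of_nonneg _ h0,
          List.getElem?_append_left hlt]
      rw [degreLoop, if_neg hneg', hidx, hget]
      conv_rhs => rw [degreLoop]
      rw [if_neg hneg]
      cases hg : PySem.List.pyGet? P ((P.length : Int) - i - 1) with
      | none => rfl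
      | some coef =>
          show (if (coef == 0) = true then degreLoop (P ++ [z]) ((P.length : Int) + 1) (i + 1 + 1)
                else (P.length : Int) + 1 - (i + 1 + 1))
              = if (coef == 0) = true then degreLoop P (P.length : Int) (i + 1)
                else (P.length : Int) - (i + 1)
          by_cases hc : (coef == 0) = true
          · rw [if_pos hc, if_pos hc]
            exact ih (i + 1) (by omega) (by omega)
          · rw [if_neg hc, if_neg hc]
            ring

theorem degre_append (P : List Int) (z : Int) :
    degre (P ++ [z]) = if z != 0 then (P.length : Int) else degre P := by
  unfold degre
  simp only [List.length_append, List.length_cons, List.length_nil, zero_add,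
    Nat.cast_add, Nat.cast_one]
  rw [if_neg (by simp only [beq_iff_eq]; omega : ¬ (((P.length : Int) + 1) == 0) = true)]
  rw [degreLoop]
  have hidx : (P.length : Int) + 1 - 0 - 1 = (P.length : Int) := by ring
  rw [if_neg (by omega : ¬ ((P.length : Int) + 1 - 0 - 1 < 0)), hidx]
  have hz' : PySem.List.pyGet? (P ++ [z]) (P.length : Int) = some z :=
    PySem.List.pyGet?_append_length P [] z
  rw [hz']
  show (if (z == 0) = true then degreLoop (P ++ [z]) ((P.length : Int) + 1) (0 + 1)
        else (P.length : Int) + 1 - (0 + 1))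
      = if (z != 0) = true then (P.length : Int)
        else if ((P.length : Int) == 0) = true then -1 else degreLoop P (P.length : Int) 0
  by_cases hz : z = 0
  · subst hz
    rw [if_pos (by simp : ((0 : Int) == 0) = true),
      if_neg (by simp : ¬ (((0 : Int) != 0) = true))]
    rw [degreLoop_shift P 0 ((P.length : Int) - 0).toNat 0 le_rfl rfl]
    by_cases hP : P = []
    · subst hP
      rw [if_pos (by simp : ((((([] : List Int)).length : Int)) == 0) = true)]
      rw [degreLoop, if_pos (by simp : (((([] : List Int)).length : Int)) - 0 - 1 < 0)]
    · rw [if_neg (by simp only [beq_iff_eq, Nat.cast_eq_zero, List.length_eq_zero_iff]; exact hP)]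
  · rw [if_neg (by simpa using hz : ¬ ((z == 0) = true)),
      if_pos (by simpa using hz : (z != 0) = true)]
    ring

theorem degre_eq_alt (P : List Int) : degre P = degre_alt P := by
  induction P using List.reverseRecOn with
  | nil => decide
  | append_singleton xs z ih =>
      rw [degre_append, degre_alt_append, ih]

-- ===== VERDICT (by name: the statement is the Claim_ definition above) =====
theorem degre_spec : Claim_equal_degre := by
  intro P _
  unfold Spec_degre
  exact degre_eq_alt P
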